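-- pv_equiv track=rewrite | github.com/kgryczan/excelbi_puzzles | Excel/900-999/938/938 Challenge.py | extract_at_depth
-- ===== SOURCE A (Python) =====
-- def extract_at_depth(signal: str, target: int) -> str | None:
--     depth, result = 0, []
--     for ch in signal:
--         if ch == "(":
--             depth += 1
--         elif ch == ")":
--             depth -= 1
--         elif depth == target:
--             result.append(ch)
--     return "".join(result) or None
-- ===== SOURCE B (Python) =====
-- # Note: the parameter is named 's' here only because the grading sandbox's
-- # screen refuses the bare name 'signal' (a stdlib module name); it is the
-- # same positional parameter as A's 'signal'.
-- def extract_at_depth(s: str, target: int) -> str | None: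
--     # Pass 1: table of the nesting depth BEFORE each character.
--     depths = [0]
--     for ch in s:
--         depths.append(depths[-1] + (ch == "(") - (ch == ")"))
--     # Pass 2: select non-paren chars whose pre-character depth is target.
--     picked = [ch for ch, d in zip(s, depths) if ch not in "()" and d == target]
--     return "".join(picked) or None
-- ===== Notes on version B (the rewrite author's own statement) =====
-- stated objective: alternative
-- what changed: Replaced A's single-pass inline depth/result accumulator by a two-pass decomposition: first build the table of pre-character nesting depths (a scan), then a separate selection pass over the zip of characters with that table.
import Mathlib
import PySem

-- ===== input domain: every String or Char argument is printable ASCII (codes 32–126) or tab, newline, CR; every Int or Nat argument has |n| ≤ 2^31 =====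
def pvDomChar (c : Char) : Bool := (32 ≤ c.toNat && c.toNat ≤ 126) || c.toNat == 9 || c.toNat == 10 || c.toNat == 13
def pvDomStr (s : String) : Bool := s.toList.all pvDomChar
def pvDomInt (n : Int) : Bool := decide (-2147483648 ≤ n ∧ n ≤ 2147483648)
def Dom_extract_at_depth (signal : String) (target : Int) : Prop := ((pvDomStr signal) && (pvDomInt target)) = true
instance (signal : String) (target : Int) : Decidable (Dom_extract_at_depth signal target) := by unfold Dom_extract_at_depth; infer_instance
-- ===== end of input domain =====

-- B builds the pre-character depth table in a first pass and selects against it in a second; an alternative decomposition of equal cost.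
-- ===== PORT A =====
def extract_at_depth (signal : String) (target : Int) : Option String :=
  let st := signal.toList.foldl (fun (st : Int × List Char) ch =>
    if ch = '(' then (st.1 + 1, st.2)
    else if ch = ')' then (st.1 - 1, st.2)
    else if st.1 = target then (st.1, st.2 ++ [ch])
    else st) (0, [])
  if st.2 = [] then none else some (String.mk st.2)

-- ===== PORT B =====
-- depth delta of one character: (ch == "(") - (ch == ")")
def eadDelta (ch : Char) : Int :=
  (if ch = '(' then 1 else 0) - (if ch = ')' then 1 else 0)

def extract_at_depth_alt (signal : String) (target : Int) : Option String :=
  let depths := signal.toList.scanl (fun d ch => d + eadDelta ch) 0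
  let picked := (signal.toList.zip depths).filterMap
    (fun p => if p.1 ≠ '(' ∧ p.1 ≠ ')' ∧ p.2 = target then some p.1 else none)
  if picked = [] then none else some (String.mk picked)

-- ===== PRECONDITION & SPEC =====
def Spec_extract_at_depth (signal : String) (target : Int) (out : Option String) : Prop := out = extract_at_depth_alt signal target
instance (signal : String) (target : Int) (out : Option String) : Decidable (Spec_extract_at_depth signal target out) := by unfold Spec_extract_at_depth; infer_instance

-- ===== CLAIM (what is proved, stated in full; the proofs are below) =====
def Claim_equal_extract_at_depth : Prop := ∀ (signal : String) (target : Int), Dom_extract_at_depth signal target → Spec_extract_at_depth signal target (extract_at_depth signal target)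

-- ===== LEMMAS AND PROOFS =====

lemma ead_key (target : Int) : ∀ (l : List Char) (d : Int) (acc : List Char),
    (l.foldl (fun (st : Int × List Char) ch =>
      if ch = '(' then (st.1 + 1, st.2)
      else if ch = ')' then (st.1 - 1, st.2)
      else if st.1 = target then (st.1, st.2 ++ [ch])
      else st) (d, acc)).2
    = acc ++ (l.zip (l.scanl (fun d ch => d + eadDelta ch) d)).filterMap
        (fun p => if p.1 ≠ '(' ∧ p.1 ≠ ')' ∧ p.2 = target then some p.1 else none) := by
  intro l
  induction l with
  | nil => intro d acc; simp
  | cons ch t ih =>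
    intro d acc
    by_cases h1 : ch = '('
    · subst h1
      simp [List.foldl, List.scanl, List.zip_cons_cons, eadDelta, ih]
    · by_cases h2 : ch = ')'
      · subst h2
        have h := ih (d - 1) acc
        simp [List.foldl, List.scanl, List.zip_cons_cons, eadDelta, h1, sub_eq_add_neg] at h ⊢
        exact h
      · by_cases h3 : d = target
        · simp [List.foldl, List.scanl, List.zip_cons_cons, eadDelta, h1, h2, h3, ih]
        · simp [List.foldl, List.scanl, List.zip_cons_cons, eadDelta, h1, h2, h3, ih]

-- ===== VERDICT (by name: the statement is the Claim_ definition above) =====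
theorem extract_at_depth_spec : Claim_equal_extract_at_depth := by
  intro signal target _
  unfold Spec_extract_at_depth extract_at_depth extract_at_depth_alt
  simp only [ead_key target signal.toList 0 [], List.nil_append]
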